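-- pv_equiv track=rewrite | github.com/kira-ko/algorithms_semester1 | lab4/task6/src/main.py | process_commands
-- ===== SOURCE A (Python) =====
-- from collections import deque
--
-- class MinQueue:
--     def __init__(self):
--         self.queue = deque()
--         self.min_queue = deque()
--
--     def push(self, value):
--         self.queue.append(value)
--         while self.min_queue and self.min_queue[-1] > value:
--             self.min_queue.pop()
--         self.min_queue.append(value)
--
--     def pop(self):
--         if self.queue:
--             value = self.queue.popleft()
--             if value == self.min_queue[0]:
--                 self.min_queue.popleft()
--
--     def get_min(self):
--         if self.min_queue:
--             return self.min_queue[0]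
--
-- def process_commands(commands):
--     queue = MinQueue()
--     results = []
--
--     for command in commands:
--         if command.startswith("+"):
--             _, value = command.split()
--             queue.push(int(value))
--         elif command == "-":
--             queue.pop()
--         elif command == "?":
--             results.append(queue.get_min())
--
--     return results
-- ===== SOURCE B (Python) =====
-- def process_commands(commands):
--     # pass 1: parse the textual commands into a list of ops
--     ops = []
--     for command in commands:
--         if command.startswith("+"):
--             ops.append(("+", int(command.split()[1])))
--         elif command in ("-", "?"):
--             ops.append((command, 0))
--     # pass 2: replay the ops over an append-only push log with a front index
--     pushed = []
--     front = 0
--     out = []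
--     for kind, n in ops:
--         if kind == "+":
--             pushed.append(n)
--         elif kind == "-":
--             if front < len(pushed):
--                 front += 1
--         else:
--             out.append(min(pushed[front:]) if front < len(pushed) else None)
--     return out
-- ===== Notes on version B (the rewrite author's own statement) =====
-- stated objective: alternative
-- what changed: Replaces the MinQueue's twin monotonic deques by a two-stage pipeline: commands are first parsed into an op list, then replayed over an append-only push log with a front index, answering '?' by scanning the live window pushed[front:] (None when empty).
import Mathlib
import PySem

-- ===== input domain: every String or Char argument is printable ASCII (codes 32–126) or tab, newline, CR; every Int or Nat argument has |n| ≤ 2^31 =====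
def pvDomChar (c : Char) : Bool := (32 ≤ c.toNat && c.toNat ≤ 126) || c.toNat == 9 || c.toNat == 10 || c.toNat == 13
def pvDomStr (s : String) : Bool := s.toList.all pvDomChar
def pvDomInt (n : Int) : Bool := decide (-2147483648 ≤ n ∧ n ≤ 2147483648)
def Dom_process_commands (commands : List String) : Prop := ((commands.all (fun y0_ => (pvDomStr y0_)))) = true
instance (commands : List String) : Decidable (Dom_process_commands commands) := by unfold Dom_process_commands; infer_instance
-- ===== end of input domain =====

-- B replaces A's MinQueue twin-deque machinery by a two-stage pipeline: parse commands into an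
-- op list, then replay the ops over an append-only push log with a front index, scanning the
-- live window for each '?' (alternative structure, not faster); equivalence is about the return value.

-- ===== PORT A =====
-- state: (queue, min_queue, results); MinQueue.push: append to queue, pop min_queue from
-- the back while its last element exceeds the value, then append the value.
def stepA (st : List Int × List Int × List (Option Int)) (c : String) :
    List Int × List Int × List (Option Int) :=
  let (q, mq, res) := st
  if PySem.Str.startswith c "+" then
    match PySem.Str.split₀ c with
    | [_, v] =>
      match PySem.Int.ofStr? v with
      | some n => (q ++ [n], ((mq.reverse.dropWhile (fun a => decide (n < a))).reverse) ++ [n], res)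
      | none => (q, mq, res)  -- Python raises ValueError here; excluded by Pre_
    | _ => (q, mq, res)       -- Python raises ValueError (tuple unpack) here; excluded by Pre_
  else if c = "-" then
    match q with
    | [] => (q, mq, res)
    | x :: qs =>
      match mq with
      | m :: ms => (qs, if x = m then ms else m :: ms, res)
      | [] => (qs, [], res)   -- unreachable: min_queue is nonempty whenever queue is
  else if c = "?" then (q, mq, res ++ [mq.head?])
  else (q, mq, res)

def process_commands (commands : List String) : List (Option Int) :=
  (commands.foldl stepA ([], [], [])).2.2

-- ===== PORT B =====
-- pass 1 result: one op per effective command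
inductive Op
  | push : Int → Op
  | pop : Op
  | ask : Op
  | skip : Op
deriving DecidableEq, Repr

-- 'command.split()[1]' raises IndexError / 'int' raises ValueError on malformed '+' commands;
-- those inputs are excluded by Pre_, the port returns skip there.
def parseCmd (c : String) : Op :=
  if PySem.Str.startswith c "+" then
    match PySem.Str.split₀ c with
    | _ :: v :: _ =>
      match PySem.Int.ofStr? v with
      | some n => Op.push n
      | none => Op.skip
    | _ => Op.skip
  else if c = "-" then Op.pop
  else if c = "?" then Op.ask
  else Op.skip

-- pass 2: replay over (pushed, front, out); 'pushed[front:]' with 0 ≤ front ≤ len is List.drop.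
def stepOp (st : List Int × Nat × List (Option Int)) (op : Op) :
    List Int × Nat × List (Option Int) :=
  match op with
  | Op.push n => (st.1 ++ [n], st.2.1, st.2.2)
  | Op.pop => (st.1, if st.2.1 < st.1.length then st.2.1 + 1 else st.2.1, st.2.2)
  | Op.ask => (st.1, st.2.1,
      st.2.2 ++ [if st.2.1 < st.1.length
                 then PySem.List.min? (st.1.drop st.2.1) (fun x => x) else none])
  | Op.skip => st

def process_commands_alt (commands : List String) : List (Option Int) :=
  ((commands.map parseCmd).foldl stepOp ([], 0, [])).2.2

-- ===== PRECONDITION & SPEC =====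
-- Pre_ excludes exactly the commands on which Python A raises ValueError: a command starting
-- with '+' whose split() does not yield exactly two tokens, or whose second token is not int-like.
def OkCmd (c : String) : Bool :=
  !(PySem.Str.startswith c "+") ||
    (match PySem.Str.split₀ c with
     | [_, v] => (PySem.Int.ofStr? v).isSome
     | _ => false)

def Pre_process_commands (commands : List String) : Prop :=
  ∀ c ∈ commands, OkCmd c = true
instance (commands : List String) : Decidable (Pre_process_commands commands) := by
  unfold Pre_process_commands; infer_instance

def pvWitness_process_commands : List String := ["+ 5", "+ 3", "?", "-", "?", "-", "?"]

def Spec_process_commands (commands : List String) (out : List (Option Int)) : Prop := out = process_commands_alt commands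
instance (commands : List String) (out : List (Option Int)) : Decidable (Spec_process_commands commands out) := by unfold Spec_process_commands; infer_instance

-- ===== CLAIM (what is proved, stated in full; the proofs are below) =====
def Claim_equal_process_commands : Prop := ∀ (commands : List String), Dom_process_commands commands → Pre_process_commands commands → Spec_process_commands commands (process_commands commands)

-- ===== LEMMAS AND PROOFS =====

-- records q = the elements of q that are ≤ every later element: A's min_queue as a function of q.
def records : List Int → List Int
  | [] => []
  | x :: xs => if xs.all (fun y => decide (x ≤ y)) then x :: records xs else records xs

theorem records_mem {q : List Int} {y : Int} (h : y ∈ records q) : y ∈ q := by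
  induction q with
  | nil => simpa [records] using h
  | cons x xs ih =>
    simp only [records] at h
    split at h
    · rcases List.mem_cons.1 h with h | h
      · simp [h]
      · exact List.mem_cons_of_mem _ (ih h)
    · exact List.mem_cons_of_mem _ (ih h)

theorem records_nil_iff (q : List Int) : records q = [] ↔ q = [] := by
  induction q with
  | nil => simp [records]
  | cons x xs ih =>
    simp only [records]
    split
    · simp
    · rename_i hall
      rw [ih]
      constructor
      · intro h; subst h; simp at hall
      · intro h; exact absurd h (by simp)

theorem records_head_min {q : List Int} {m : Int} {ms : List Int}
    (h : records q = m :: ms) : ∀ y ∈ q, m ≤ y := by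
  induction q generalizing ms with
  | nil => simp [records] at h
  | cons x xs ih =>
    simp only [records] at h
    split at h
    · rename_i hall
      obtain ⟨hm, _⟩ := List.cons.inj h
      intro y hy
      rcases List.mem_cons.1 hy with rfl | hy
      · exact le_of_eq hm.symm
      · simpa [← hm] using (List.all_eq_true.1 hall) y hy
    · rename_i hall
      intro y hy
      rcases List.mem_cons.1 hy with rfl | hy
      · have hex : ¬ ∀ z ∈ xs, y ≤ z := by
          intro hforall
          exact hall (List.all_eq_true.2 (fun z hz => decide_eq_true (hforall z hz)))
        push_neg at hex
        obtain ⟨z, hz, hzx⟩ := hex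
        exact le_of_lt (lt_of_le_of_lt (ih h z hz) hzx)
      · exact ih h y hy

theorem dropWhile_append_last_false (P : Int → Bool) (l : List Int) (x : Int)
    (hx : P x = false) : List.dropWhile P (l ++ [x]) = List.dropWhile P l ++ [x] := by
  rw [List.dropWhile_append]
  by_cases h : (List.dropWhile P l).isEmpty
  · simp_all [List.dropWhile, hx]
  · simp [h]

-- push: records commutes with A's push of v onto the min_queue
theorem records_push (q : List Int) (v : Int) :
    records (q ++ [v]) =
      (((records q).reverse.dropWhile (fun a => decide (v < a))).reverse) ++ [v] := by
  induction q with
  | nil => simp [records]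
  | cons x xs ih =>
    simp only [List.cons_append, records, List.all_append, List.all_cons, List.all_nil,
      Bool.and_true]
    by_cases hall : xs.all (fun y => decide (x ≤ y)) = true
    · by_cases hxv : x ≤ v
      · have hdw := dropWhile_append_last_false (fun a => decide (v < a))
          (records xs).reverse x (by simp [not_lt.2 hxv])
        simp [hall, hxv, ih, hdw]
      · have hvx : v < x := not_le.1 hxv
        have hclr'' : ∀ a ∈ (records xs).reverse, (fun a => decide (v < a)) a = true := by
          intro a ha
          have hx_le : x ≤ a := by
            simpa using (List.all_eq_true.1 hall) a (records_mem (List.mem_reverse.1 ha))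
          exact decide_eq_true (lt_of_lt_of_le hvx hx_le)
        have hclr' : ∀ a ∈ (records xs).reverse ++ [x], (fun a => decide (v < a)) a = true := by
          intro a ha
          rcases List.mem_append.1 ha with ha | ha
          · exact hclr'' a ha
          · simp only [List.mem_singleton] at ha; subst ha; exact decide_eq_true hvx
        have h1 : List.dropWhile (fun a => decide (v < a)) (records xs).reverse = [] :=
          List.dropWhile_eq_nil_iff.2 hclr''
        have h2 : List.dropWhile (fun a => decide (v < a)) ((records xs).reverse ++ [x]) = [] :=
          List.dropWhile_eq_nil_iff.2 hclr'
        simp [hall, hxv, ih, h1, h2]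
    · simp [hall, ih]

-- pop: A's conditional popleft of the min_queue matches records of the popped queue
theorem records_pop (x : Int) (qs : List Int) :
    (match records (x :: qs) with
      | m :: ms => if x = m then ms else m :: ms
      | [] => ([] : List Int)) = records qs := by
  simp only [records]
  by_cases hall : qs.all (fun y => decide (x ≤ y)) = true
  · simp [hall]
  · simp only [hall, Bool.false_eq_true, if_false]
    cases hr : records qs with
    | nil =>
      have h : qs = [] := (records_nil_iff qs).1 hr
      subst h; simp at hall
    | cons m ms =>
      have hm : ∀ y ∈ qs, m ≤ y := records_head_min hr
      have hex : ¬ ∀ z ∈ qs, x ≤ z := by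
        intro hforall
        exact hall (List.all_eq_true.2 (fun z hz => decide_eq_true (hforall z hz)))
      push_neg at hex
      obtain ⟨z, hz, hzx⟩ := hex
      have hxm : x ≠ m := by
        intro h; subst h
        exact absurd (hm z hz) (not_le.2 hzx)
      simp [hxm]

-- '?': the head of records q is the min of the window q (none when empty)
theorem records_head_eq_min (q : List Int) :
    (records q).head? = (if q = [] then none else PySem.List.min? q (fun x => x)) := by
  cases hr : records q with
  | nil =>
    have hq : q = [] := (records_nil_iff q).1 hr
    simp [hq]
  | cons m ms =>
    have hq : q ≠ [] := by
      intro h; subst h; simp [records] at hr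
    have hmem : m ∈ q := records_mem (hr ▸ List.mem_cons_self)
    have hmin : ∀ y ∈ q, m ≤ y := records_head_min hr
    rw [if_neg hq]
    cases hmq : PySem.List.min? q (fun x => x) with
    | none => exact absurd ((PySem.List.min?_eq_none_iff q (fun x => x)).1 hmq) hq
    | some m' =>
      have h1 : m' ≤ m := PySem.List.min?_isMin hmq m hmem
      have h2 : m ≤ m' := hmin m' (PySem.List.min?_mem hmq)
      simp [le_antisymm h1 h2]

-- main invariant: A's queue is the live window pushed.drop front, A's min_queue its records
theorem fold_eq (cmds : List String) :
    ∀ (pushed : List Int) (front : Nat) (res : List (Option Int)),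
      front ≤ pushed.length →
      (∀ c ∈ cmds, OkCmd c = true) →
      (cmds.foldl stepA (pushed.drop front, records (pushed.drop front), res)).2.2
        = ((cmds.map parseCmd).foldl stepOp (pushed, front, res)).2.2 := by
  induction cmds with
  | nil => intro pushed front res _ _; simp
  | cons c cs ih =>
    intro pushed front res hle hok
    have hc : OkCmd c = true := hok c List.mem_cons_self
    have hcs : ∀ c' ∈ cs, OkCmd c' = true := fun c' h => hok c' (List.mem_cons_of_mem _ h)
    simp only [List.map_cons, List.foldl_cons]
    by_cases hplus : PySem.Str.startswith c "+" = true
    · have hplusC : PySem.Chars.startswith c.toList ['+'] = true := by simpa using hplus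
      unfold OkCmd at hc
      simp only [hplus, Bool.not_true, Bool.false_or] at hc
      cases hsp : PySem.Str.split₀ c with
      | nil => rw [hsp] at hc; simp at hc
      | cons a rest =>
        cases rest with
        | nil => rw [hsp] at hc; simp at hc
        | cons v rest2 =>
          cases rest2 with
          | nil =>
            rw [hsp] at hc
            change (PySem.Int.ofStr? v).isSome = true at hc
            cases hn : PySem.Int.ofStr? v with
            | none => rw [hn] at hc; simp at hc
            | some n =>
              have hdrop : (pushed ++ [n]).drop front = pushed.drop front ++ [n] :=
                List.drop_append_of_le_length hle
              have hA : stepA (pushed.drop front, records (pushed.drop front), res) c =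
                  ((pushed ++ [n]).drop front, records ((pushed ++ [n]).drop front), res) := by
                simp [stepA, hplusC, hsp, hn, hdrop, records_push]
              have hP : parseCmd c = Op.push n := by
                simp [parseCmd, hplusC, hsp, hn]
              rw [hA, hP]
              have := ih (pushed ++ [n]) front res
                (le_trans hle (by simp)) hcs
              simpa [stepOp] using this
          | cons _ _ => rw [hsp] at hc; simp at hc
    · have hplusC : PySem.Chars.startswith c.toList ['+'] = false := by
        simpa using hplus
      by_cases hminus : c = "-"
      · subst hminus
        have hswm : PySem.Chars.startswith ['-'] ['+'] = false := by decide
        have hP : parseCmd "-" = Op.pop := by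
          simp [parseCmd, hswm]
        rw [hP]
        by_cases hlt : front < pushed.length
        · have hq : pushed.drop front ≠ [] := by
            simp [List.drop_eq_nil_iff]; omega
          obtain ⟨x, qs, hxqs⟩ := List.exists_cons_of_ne_nil hq
          have hqs : pushed.drop (front + 1) = qs := by
            rw [← List.tail_drop, hxqs, List.tail_cons]
          have hA : stepA (pushed.drop front, records (pushed.drop front), res) "-" =
              (pushed.drop (front + 1), records (pushed.drop (front + 1)), res) := by
            simp only [stepA, PySem.Str.startswith_eq, String.toList, hswm, Bool.false_eq_true,
              if_false, if_pos rfl, hxqs, hqs]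
            have hrp := records_pop x qs
            cases hrec : records (x :: qs) with
            | nil => exact absurd ((records_nil_iff _).1 hrec) (by simp)
            | cons m ms =>
              rw [hrec] at hrp
              exact congrArg (fun l => (qs, l, res)) hrp
          rw [hA]
          have := ih pushed (front + 1) res (by omega) hcs
          simpa [stepOp, hlt] using this
        · have hq : pushed.drop front = [] := by
            rw [List.drop_eq_nil_iff]; omega
          have hA : stepA (pushed.drop front, records (pushed.drop front), res) "-" =
              (pushed.drop front, records (pushed.drop front), res) := by
            simp [stepA, hswm, hq, records]
          rw [hA]
          have := ih pushed front res hle hcs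
          simpa [stepOp, hlt] using this
      · by_cases hq : c = "?"
        · subst hq
          have hswq : PySem.Chars.startswith ['?'] ['+'] = false := by decide
          have hP : parseCmd "?" = Op.ask := by
            simp [parseCmd, hswq]
          rw [hP]
          have hA : stepA (pushed.drop front, records (pushed.drop front), res) "?" =
              (pushed.drop front, records (pushed.drop front),
               res ++ [(records (pushed.drop front)).head?]) := by
            simp [stepA, hswq]
          rw [hA]
          have hwin : (records (pushed.drop front)).head? =
              (if front < pushed.length
               then PySem.List.min? (pushed.drop front) (fun x => x) else none) := by
            rw [records_head_eq_min]
            by_cases hlt : front < pushed.length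
            · have : pushed.drop front ≠ [] := by
                simp [List.drop_eq_nil_iff]; omega
              simp [hlt, this]
            · have : pushed.drop front = [] := by
                rw [List.drop_eq_nil_iff]; omega
              simp [hlt, this]
          rw [hwin]
          have := ih pushed front (res ++ [if front < pushed.length
            then PySem.List.min? (pushed.drop front) (fun x => x) else none]) hle hcs
          simpa [stepOp] using this
        · have hP : parseCmd c = Op.skip := by
            simp [parseCmd, hplusC, hminus, hq]
          have hA : stepA (pushed.drop front, records (pushed.drop front), res) c =
              (pushed.drop front, records (pushed.drop front), res) := by
            simp [stepA, hplusC, hminus, hq]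
          rw [hA, hP]
          have := ih pushed front res hle hcs
          simpa [stepOp] using this

-- ===== VERDICT (by name: the statement is the Claim_ definition above) =====
theorem process_commands_spec : Claim_equal_process_commands := by
  intro commands _ hpre
  unfold Spec_process_commands process_commands process_commands_alt
  have := fold_eq commands [] 0 [] (by simp) hpre
  simpa using this
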